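-- pv_equiv track=rewrite | github.com/aorursy/KT_dataset_py | nhatncb97_python-week-1.py | matrix_from_det_of_minor_matrix
-- ===== SOURCE A (Python) =====
-- def det_2x2(matrix):
--
--     return matrix[0][0] * matrix[1][1] - matrix[0][1] * matrix[1][0];
--
-- def matrix_from_det_of_minor_matrix(minor_matrices_arr):
--
--     adj_matrix = [];
--
--     row = [];
--
--     for k in range(len(minor_matrices_arr)):
--
--         row.append(det_2x2(minor_matrices_arr[k]));
--
--         if len(row) == 3:
--
--             adj_matrix.append(row);
--
--             row = [];
--
--     return adj_matrix;
-- ===== SOURCE B (Python) =====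
-- def det_2x2(matrix):
--     return matrix[0][0] * matrix[1][1] - matrix[0][1] * matrix[1][0]
--
-- def matrix_from_det_of_minor_matrix(minor_matrices_arr):
--     return [[det_2x2(minor_matrices_arr[3 * g + j]) for j in range(3)]
--             for g in range(len(minor_matrices_arr) // 3)]
-- ===== Notes on version B (the rewrite author's own statement) =====
-- stated objective: alternative
-- what changed: B computes the number of complete rows up-front (len//3) and builds each row by random access at computed indices 3*g+j, replacing A's sequential scan with a row buffer and conditional emit; A also evaluates determinants of trailing leftover minors (and discards them) while B never touches them.
import Mathlib
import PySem

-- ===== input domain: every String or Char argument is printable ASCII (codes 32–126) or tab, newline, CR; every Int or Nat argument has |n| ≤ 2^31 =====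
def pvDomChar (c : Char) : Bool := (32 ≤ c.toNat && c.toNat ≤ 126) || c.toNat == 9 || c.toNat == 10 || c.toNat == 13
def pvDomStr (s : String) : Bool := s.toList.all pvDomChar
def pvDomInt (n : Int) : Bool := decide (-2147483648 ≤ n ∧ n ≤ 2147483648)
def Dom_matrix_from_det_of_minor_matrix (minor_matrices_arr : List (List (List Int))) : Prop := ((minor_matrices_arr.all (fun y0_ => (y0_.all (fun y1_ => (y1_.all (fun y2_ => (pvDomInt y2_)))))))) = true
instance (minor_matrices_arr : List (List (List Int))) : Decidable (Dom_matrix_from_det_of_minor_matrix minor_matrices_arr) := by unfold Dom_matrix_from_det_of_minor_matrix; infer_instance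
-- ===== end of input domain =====

-- B computes the number of complete rows up-front (len//3) and builds each row by
-- random access at computed indices 3*g+j, instead of A's sequential scan with a
-- row buffer and conditional emit (same O(n) cost, different decomposition).

-- ===== PORT A =====
-- det_2x2: m[0][0]*m[1][1] - m[0][1]*m[1][0]; pyGetD used under Pre_ (indices in range there)
def detA (m : List (List Int)) : Int :=
  PySem.List.pyGetD (PySem.List.pyGetD m 0 []) 0 0 * PySem.List.pyGetD (PySem.List.pyGetD m 1 []) 1 0
    - PySem.List.pyGetD (PySem.List.pyGetD m 0 []) 1 0 * PySem.List.pyGetD (PySem.List.pyGetD m 1 []) 0 0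

-- for k in range(len(arr)): row.append(det_2x2(arr[k])); if len(row)==3: adj.append(row); row=[]
def matrix_from_det_of_minor_matrix (minor_matrices_arr : List (List (List Int))) : List (List Int) :=
  ((PySem.List.pyRange 0 minor_matrices_arr.length 1).foldl
    (fun (s : List (List Int) × List Int) k =>
      let row := s.2 ++ [detA (PySem.List.pyGetD minor_matrices_arr k [])]
      if row.length == 3 then (s.1 ++ [row], ([] : List Int)) else (s.1, row))
    (([] : List (List Int)), ([] : List Int))).1

-- ===== PORT B =====
def detB (m : List (List Int)) : Int :=
  PySem.List.pyGetD (PySem.List.pyGetD m 0 []) 0 0 * PySem.List.pyGetD (PySem.List.pyGetD m 1 []) 1 0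
    - PySem.List.pyGetD (PySem.List.pyGetD m 0 []) 1 0 * PySem.List.pyGetD (PySem.List.pyGetD m 1 []) 0 0

-- [[det_2x2(arr[3*g+j]) for j in range(3)] for g in range(len(arr)//3)]
def matrix_from_det_of_minor_matrix_alt (minor_matrices_arr : List (List (List Int))) : List (List Int) :=
  (PySem.List.pyRange 0 (PySem.Int.floordiv (minor_matrices_arr.length : Int) 3) 1).map (fun g =>
    (PySem.List.pyRange 0 3 1).map (fun j =>
      detB (PySem.List.pyGetD minor_matrices_arr (3 * g + j) [])))

-- ===== PRECONDITION & SPEC =====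
-- Pre_ excludes exactly the inputs where Python's A raises IndexError in det_2x2:
-- some minor matrix has fewer than 2 rows, or its row 0 or row 1 shorter than 2.
def Pre_matrix_from_det_of_minor_matrix (minor_matrices_arr : List (List (List Int))) : Prop :=
  ∀ m ∈ minor_matrices_arr, 2 ≤ m.length ∧ ∀ r ∈ m.take 2, 2 ≤ r.length
instance (minor_matrices_arr : List (List (List Int))) : Decidable (Pre_matrix_from_det_of_minor_matrix minor_matrices_arr) := by unfold Pre_matrix_from_det_of_minor_matrix; infer_instance

def pvWitness_matrix_from_det_of_minor_matrix : List (List (List Int)) :=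
  [[[1, 2], [3, 4]], [[0, 1], [1, 0]], [[2, 0], [0, 2]], [[5, 6], [7, 8]]]

def Spec_matrix_from_det_of_minor_matrix (minor_matrices_arr : List (List (List Int))) (out : List (List Int)) : Prop := out = matrix_from_det_of_minor_matrix_alt minor_matrices_arr
instance (minor_matrices_arr : List (List (List Int))) (out : List (List Int)) : Decidable (Spec_matrix_from_det_of_minor_matrix minor_matrices_arr out) := by unfold Spec_matrix_from_det_of_minor_matrix; infer_instance

-- ===== CLAIM (what is proved, stated in full; the proofs are below) =====
def Claim_equal_matrix_from_det_of_minor_matrix : Prop := ∀ (minor_matrices_arr : List (List (List Int))), Dom_matrix_from_det_of_minor_matrix minor_matrices_arr → Pre_matrix_from_det_of_minor_matrix minor_matrices_arr → Spec_matrix_from_det_of_minor_matrix minor_matrices_arr (matrix_from_det_of_minor_matrix minor_matrices_arr)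


-- ===== LEMMAS AND PROOFS =====

-- proof-side helper: the complete triples of a list
def chunk3 : List Int → List (List Int)
  | a :: b :: c :: rest => [a, b, c] :: chunk3 rest
  | _ => []

-- A's loop body, seen as a function of the determinant of the current minor
def stepA (s : List (List Int) × List Int) (d : Int) : List (List Int) × List Int :=
  let row := s.2 ++ [d]
  if row.length == 3 then (s.1 ++ [row], ([] : List Int)) else (s.1, row)

-- A's accumulate-and-emit fold over the determinant list produces exactly the complete triples
theorem foldA_chunk3 : ∀ (ds : List Int) (adj : List (List Int)),
    (ds.foldl stepA (adj, ([] : List Int))).1 = adj ++ chunk3 ds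
  | [], adj => by simp [chunk3]
  | [a], adj => by simp [chunk3, stepA]
  | [a, b], adj => by simp [chunk3, stepA]
  | a :: b :: c :: rest, adj => by
      simp only [List.foldl_cons, stepA, List.nil_append, List.length_cons, List.length_nil,
        List.length_append]
      norm_num
      rw [foldA_chunk3 rest (adj ++ [[a, b, c]])]
      simp [chunk3]

-- B's group-indexed rows are exactly the complete triples of the determinant list
theorem key_chunk3 : ∀ (L : List (List (List Int))),
    (List.range (L.length / 3)).map (fun g =>
        [detB (L.getD (3 * g) []), detB (L.getD (3 * g + 1) []), detB (L.getD (3 * g + 2) [])])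
      = chunk3 (L.map detB)
  | [] => by simp [chunk3]
  | [x] => by simp [chunk3]
  | [x, y] => by simp [chunk3]
  | x :: y :: z :: rest => by
      have hlen : (x :: y :: z :: rest).length = rest.length + 3 := by simp
      rw [hlen, Nat.add_div_right _ (by norm_num), List.range_succ_eq_map, List.map_cons,
        List.map_map]
      have h0 : [detB ((x :: y :: z :: rest).getD (3 * 0) []),
          detB ((x :: y :: z :: rest).getD (3 * 0 + 1) []),
          detB ((x :: y :: z :: rest).getD (3 * 0 + 2) [])] = [detB x, detB y, detB z] := by
        norm_num
      rw [h0]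
      have hshift : ∀ g : Nat,
          ((fun g => [detB ((x :: y :: z :: rest).getD (3 * g) []),
              detB ((x :: y :: z :: rest).getD (3 * g + 1) []),
              detB ((x :: y :: z :: rest).getD (3 * g + 2) [])]) ∘ Nat.succ) g
          = [detB (rest.getD (3 * g) []), detB (rest.getD (3 * g + 1) []),
             detB (rest.getD (3 * g + 2) [])] := by
        intro g
        simp only [Function.comp_apply]
        have e1 : 3 * Nat.succ g = (3 * g) + 3 := by omega
        have e2 : 3 * Nat.succ g + 1 = (3 * g + 1) + 3 := by omega
        have e3 : 3 * Nat.succ g + 2 = (3 * g + 2) + 3 := by omega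
        have hc : ∀ n : Nat, (x :: y :: z :: rest).getD (n + 3) ([] : List (List Int))
            = rest.getD n [] := by intro n; simp [List.getD]
        rw [e3, e2, e1, hc, hc, hc]
      rw [List.map_congr_left (fun g _ => hshift g), key_chunk3 rest]
      simp [chunk3]

-- B's port equals the complete triples of the determinant list
theorem altB_chunk3 (L : List (List (List Int))) :
    matrix_from_det_of_minor_matrix_alt L = chunk3 (L.map detB) := by
  unfold matrix_from_det_of_minor_matrix_alt
  have h3 : PySem.Int.floordiv (L.length : Int) 3 = ((L.length / 3 : Nat) : Int) := by
    exact_mod_cast PySem.Int.floordiv_natCast L.length 3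
  have ht : (((L.length / 3 : Nat) : Int) - 0).toNat = L.length / 3 := by omega
  have hr3 : PySem.List.pyRange 0 3 1 = [0, 1, 2] := by decide
  simp only [hr3, List.map_cons, List.map_nil]
  rw [h3, PySem.List.pyRange_one, ht, List.map_map]
  rw [← key_chunk3 L]
  apply List.map_congr_left
  intro g _
  simp only [Function.comp_apply]
  have e0 : (0 : Int) + (g : Int) = ((g : Nat) : Int) := by omega
  have i0 : 3 * ((g : Nat) : Int) + 0 = ((3 * g : Nat) : Int) := by push_cast; ring
  have i1 : 3 * ((g : Nat) : Int) + 1 = ((3 * g + 1 : Nat) : Int) := by push_cast; ring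
  have i2 : 3 * ((g : Nat) : Int) + 2 = ((3 * g + 2 : Nat) : Int) := by push_cast; ring
  rw [e0, i1, i2, i0]
  simp only [PySem.List.pyGetD_natCast]

-- ===== VERDICT (by name: the statement is the Claim_ definition above) =====
theorem matrix_from_det_of_minor_matrix_spec : Claim_equal_matrix_from_det_of_minor_matrix := by
  intro arr _ _
  unfold Spec_matrix_from_det_of_minor_matrix matrix_from_det_of_minor_matrix
  rw [altB_chunk3]
  show (List.foldl (fun s k => stepA s (detA (PySem.List.pyGetD arr k [])))
      (([] : List (List Int)), ([] : List Int)) (PySem.List.pyRange 0 arr.length 1)).1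
    = chunk3 (List.map detB arr)
  rw [PySem.List.foldl_pyRange_zero_pyGetD' arr ([] : List (List Int))
    (fun s m => stepA s (detA m)) (([] : List (List Int)), ([] : List Int))]
  rw [show (List.foldl (fun s m => stepA s (detA m)) (([] : List (List Int)), ([] : List Int)) arr)
      = (List.foldl stepA (([] : List (List Int)), ([] : List Int)) (arr.map detA))
    from (List.foldl_map ..).symm, foldA_chunk3]
  have : detA = detB := rfl
  simp [this]
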